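-- pv_equiv track=rewrite | github.com/GSoli96/Safety_Aware_PGD | src/optimal_selection.py | compress_safe_group
-- ===== SOURCE A (Python) =====
-- def compress_safe_group(safe_group, target_length_word, neutral_words):
--     extra = neutral_words.copy()
--     compressed = safe_group.copy()
--     matches = [(i, token) for i, token in enumerate(compressed) if token in extra]
--     while len(compressed) > target_length_word:
--         if len(matches) > 0:
--             i, token = matches.pop()
--             compressed.remove(token)
--         else:
--             compressed.pop()
--     return compressed
-- ===== SOURCE B (Python) =====
-- def compress_safe_group(safe_group, target_length_word, neutral_words):
--     n = len(safe_group)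
--     d = n - target_length_word          # how many tokens must go
--     if d <= 0:
--         return safe_group.copy()
--     neutral = set(neutral_words)
--     toks = [w for w in safe_group if w in neutral]
--     k = min(d, len(toks))               # neutral removals available
--     counts = {}                         # per-value removal quota: last k neutral occurrences
--     for w in toks[len(toks) - k:]:
--         counts[w] = counts.get(w, 0) + 1
--     out = []
--     for w in safe_group:                # single pass: skip the first counts[w] occurrences of w
--         if counts.get(w, 0) > 0:
--             counts[w] = counts[w] - 1
--         else:
--             out.append(w)
--     if d > k:                           # still too long: trim the tail to the target
--         out = out[:max(target_length_word, 0)]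
--     return out
-- ===== Notes on version B (the rewrite author's own statement) =====
-- stated objective: faster
-- what changed: Replaces the quadratic while-loop of repeated list.remove/pop calls by one counting pass: a per-value quota of the last k neutral occurrences is built once, then a single pass skips the first quota[w] occurrences of each value and the tail is trimmed in one slice.
-- outside the precondition, e.g. on compress_safe_group(['a'], -1, []): A raises IndexError, B returns []
import Mathlib
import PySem

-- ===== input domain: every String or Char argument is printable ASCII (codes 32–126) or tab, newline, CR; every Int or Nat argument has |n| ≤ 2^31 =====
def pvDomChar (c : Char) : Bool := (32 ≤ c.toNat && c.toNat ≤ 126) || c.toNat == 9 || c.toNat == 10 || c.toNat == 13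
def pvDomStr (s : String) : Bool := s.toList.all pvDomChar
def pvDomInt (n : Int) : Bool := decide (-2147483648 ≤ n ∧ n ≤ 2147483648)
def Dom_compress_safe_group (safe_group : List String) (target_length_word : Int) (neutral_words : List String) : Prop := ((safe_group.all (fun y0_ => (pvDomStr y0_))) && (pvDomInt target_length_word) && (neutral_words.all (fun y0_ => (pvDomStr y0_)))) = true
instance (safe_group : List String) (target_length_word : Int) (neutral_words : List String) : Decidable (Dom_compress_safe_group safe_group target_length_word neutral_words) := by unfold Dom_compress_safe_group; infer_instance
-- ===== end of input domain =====

-- B replaces A's quadratic loop of repeated list.remove/list.pop by one counting pass plus a tail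
-- slice (objective: faster). Equivalence is claimed for target_length_word ≥ 0 (Pre_); for negative
-- targets A raises IndexError while B returns [].

-- ===== PORT A =====
-- termination helper for the while-loop: a successful remove shortens the list by one
theorem pvRemoveLen {c c' : List String} {w : String} (h : PySem.List.remove? c w = some c') :
    c'.length + 1 = c.length := by
  have hw : w ∈ c := by
    by_contra hw
    rw [PySem.List.remove?_eq_none_iff c w |>.mpr hw] at h
    simp at h
  rw [PySem.List.remove?_eq_some_erase c w hw] at h
  cases h
  have := List.length_erase_of_mem hw
  have : 0 < c.length := List.length_pos_of_mem hw
  omega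

-- the 'while len(compressed) > target: …' loop of A
def csgLoop (compressed : List String) (mts : List (Int × String)) (target : Int) : List String :=
  if (compressed.length : Int) > target then
    if mts.length > 0 then
      match h : PySem.List.pop? mts with
      | none => compressed          -- unreachable: mts is nonempty
      | some ((_, token), ms') =>
        match h2 : PySem.List.remove? compressed token with
        | none => compressed        -- ValueError: unreachable (every match token occurs)
        | some c' => csgLoop c' ms' target
    else
      match h3 : PySem.List.pop? compressed with
      | none => compressed          -- IndexError on empty pop: outside Pre_
      | some (_, c') => csgLoop c' mts target
  else compressed
termination_by compressed.length + mts.length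
decreasing_by
  · have h1 : ms'.length + 1 = mts.length := PySem.List.length_of_pop?_eq_some mts h
    have h2' := pvRemoveLen h2
    omega
  · have h1 : c'.length + 1 = compressed.length := PySem.List.length_of_pop?_eq_some compressed h3
    omega

def compress_safe_group (safe_group : List String) (target_length_word : Int) (neutral_words : List String) : List String :=
  let extra := neutral_words
  let compressed := safe_group
  let mts := (PySem.List.enumerate compressed 0).filter (fun p => extra.contains p.2)
  csgLoop compressed mts target_length_word

-- ===== PORT B =====
def compress_safe_group_alt (safe_group : List String) (target_length_word : Int) (neutral_words : List String) : List String :=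
  let n : Int := safe_group.length
  let d : Int := n - target_length_word
  if d ≤ 0 then safe_group
  else
    let neutral := PySem.Set.ofList neutral_words
    let toks := safe_group.filter (fun w => neutral.contains w)
    let k : Int := min d (toks.length : Int)
    -- toks[len(toks)-k:] — the start index is a natural number ≤ len(toks), so the slice is exactly a drop
    let counts := (toks.drop (toks.length - k.toNat)).foldl
      (fun dd w => dd.insert w (dd.getD w 0 + 1)) PySem.Dict.empty
    let pass := safe_group.foldl
      (fun (st : PySem.Dict String Int × List String) w =>
        if st.1.getD w 0 > 0 then (st.1.insert w (st.1.getD w 0 - 1), st.2)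
        else (st.1, st.2 ++ [w]))
      (counts, [])
    let out := pass.2
    if d > k then PySem.List.slice out none (some (max target_length_word 0)) else out

-- ===== PRECONDITION & SPEC =====
-- Pre_ excludes only negative targets, on which A's loop empties the list and raises IndexError.
def Pre_compress_safe_group (safe_group : List String) (target_length_word : Int) (neutral_words : List String) : Prop := 0 ≤ target_length_word
instance (safe_group : List String) (target_length_word : Int) (neutral_words : List String) : Decidable (Pre_compress_safe_group safe_group target_length_word neutral_words) := by unfold Pre_compress_safe_group; infer_instance
def pvWitness_compress_safe_group : List String × Int × List String := (["a", "b", "a"], 1, ["a"])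

def Spec_compress_safe_group (safe_group : List String) (target_length_word : Int) (neutral_words : List String) (out : List String) : Prop := out = compress_safe_group_alt safe_group target_length_word neutral_words
instance (safe_group : List String) (target_length_word : Int) (neutral_words : List String) (out : List String) : Decidable (Spec_compress_safe_group safe_group target_length_word neutral_words out) := by unfold Spec_compress_safe_group; infer_instance

-- ===== CLAIM (what is proved, stated in full; the proofs are below) =====
def Claim_equal_compress_safe_group : Prop := ∀ (safe_group : List String) (target_length_word : Int) (neutral_words : List String), Dom_compress_safe_group safe_group target_length_word neutral_words → Pre_compress_safe_group safe_group target_length_word neutral_words → Spec_compress_safe_group safe_group target_length_word neutral_words (compress_safe_group safe_group target_length_word neutral_words)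

-- ===== LEMMAS AND PROOFS =====

-- the common specification both programs compute: erase (first occurrence of) each of the last k
-- neutral tokens, then truncate to the target
def gSpec (c : List String) (ms : List (Int × String)) (t : Int) : List String :=
  let toksm := ms.map Prod.snd
  let k := min (c.length - t.toNat) toksm.length
  (List.foldl List.erase c (toksm.drop (toksm.length - k))).take t.toNat

theorem foldl_erase_erase (S : List String) (c : List String) (a : String) :
    List.foldl List.erase (c.erase a) S = (List.foldl List.erase c S).erase a := by
  induction S generalizing c with
  | nil => rfl
  | cons w S ih =>
    simp only [List.foldl_cons]
    rw [List.erase_comm a w, ih]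

theorem length_foldl_erase (S : List String) (c : List String)
    (h : ∀ w, S.count w ≤ c.count w) :
    (List.foldl List.erase c S).length = c.length - S.length := by
  induction S generalizing c with
  | nil => simp
  | cons v S ih =>
    have hv : v ∈ c := by
      have := h v
      simp only [List.count_cons_self] at this
      exact List.count_pos_iff.mp (by omega)
    have hcount : ∀ w, S.count w ≤ (c.erase v).count w := by
      intro w
      have := h w
      rw [List.count_erase]
      by_cases hw : v = w
      · subst hw; simp at this ⊢; omega
      · simp only [List.count_cons, beq_iff_eq, if_neg hw, if_neg (Ne.symm hw)] at this ⊢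
        omega
    have hlen := List.length_erase_of_mem hv
    have hpos : 0 < c.length := List.length_pos_of_mem hv
    simp only [List.foldl_cons, ih _ hcount, hlen, List.length_cons]
    omega

-- the main loop characterisation: under the multiset invariant, A's loop computes gSpec
theorem pvPopLast {α : Type} {xs : List α} {r : α × List α} (h : PySem.List.pop? xs = some r) :
    xs = r.2 ++ [r.1] := by
  rcases List.eq_nil_or_concat' xs with rfl | ⟨l, b, rfl⟩
  · have := PySem.List.length_of_pop?_eq_some _ h
    simp at this
  · rw [PySem.List.pop?_last] at h
    cases h
    rfl

theorem gSpec_step (c : List String) (ms' : List (Int × String)) (fst : Int) (token : String) (t : Int)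
    (ht : 0 ≤ t) (hlen : (c.length : Int) > t) (htok : token ∈ c) :
    gSpec (c.erase token) ms' t = gSpec c (ms' ++ [(fst, token)]) t := by
  simp only [gSpec, List.map_append, List.map_cons, List.map_nil]
  have hE : (c.erase token).length = c.length - 1 := List.length_erase_of_mem htok
  have hτ : t.toNat < c.length := by omega
  have h1 : 0 < c.length := by omega
  set S := ms'.map Prod.snd with hS
  set k' := min ((c.erase token).length - t.toNat) S.length with hk'
  have hk'le : k' ≤ S.length := by omega
  have hk : min (c.length - t.toNat) (S ++ [token]).length = k' + 1 := by
    simp only [List.length_append, List.length_cons, List.length_nil]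
    omega
  rw [hk]
  have hidx : (S ++ [token]).length - (k' + 1) = S.length - k' := by
    simp only [List.length_append, List.length_cons, List.length_nil]
    omega
  rw [hidx]
  have harg : (S ++ [token]).drop (S.length - k') = S.drop (S.length - k') ++ [token] := by
    rw [List.drop_append]
    have h0 : S.length - k' - S.length = 0 := by omega
    rw [h0, List.drop_zero]
  rw [harg, List.foldl_append, List.foldl_cons, List.foldl_nil, foldl_erase_erase]

theorem csgLoop_eq (c : List String) (ms : List (Int × String)) (t : Int) (ht : 0 ≤ t) :
    (∀ w, (ms.map Prod.snd).count w ≤ c.count w) → csgLoop c ms t = gSpec c ms t := by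
  induction c, ms using csgLoop.induct t with
  | case1 c ms hlen hm h =>
    intro _
    rcases List.eq_nil_or_concat' ms with rfl | ⟨l, b, rfl⟩
    · simp at hm
    · rw [PySem.List.pop?_last] at h
      exact absurd h (by simp)
  | case2 c ms hlen hm fst token ms' h h2 =>
    intro hinv
    obtain rfl : ms = ms' ++ [(fst, token)] := pvPopLast h
    have htok : token ∈ c := by
      have := hinv token
      simp [List.count_append] at this
      exact List.count_pos_iff.mp (by omega)
    rw [PySem.List.remove?_eq_some_erase c token htok] at h2
    exact absurd h2 (by simp)
  | case3 c ms hlen hm fst token ms' h c' h2 ih =>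
    intro hinv
    obtain rfl : ms = ms' ++ [(fst, token)] := pvPopLast h
    have htok : token ∈ c := by
      have := hinv token
      simp [List.count_append] at this
      exact List.count_pos_iff.mp (by omega)
    have hc' : c' = c.erase token := by
      rw [PySem.List.remove?_eq_some_erase c token htok] at h2
      exact (Option.some.inj h2).symm
    have hinv' : ∀ w, (ms'.map Prod.snd).count w ≤ (c.erase token).count w := by
      intro w
      have := hinv w
      rw [List.count_erase]
      by_cases hw : w = token
      · subst hw; simp [List.count_append] at this ⊢; omega
      · simp [List.count_append, List.count_singleton, hw, Ne.symm hw] at this ⊢; omega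
    rw [csgLoop, if_pos hlen, if_pos hm]
    split
    · rename_i heq
      rw [h] at heq
      simp at heq
    · rename_i f tk m2 heq
      rw [h] at heq
      simp only [Option.some.injEq, Prod.mk.injEq] at heq
      obtain ⟨⟨rfl, rfl⟩, rfl⟩ := heq
      split
      · rename_i heq2
        rw [h2] at heq2
        simp at heq2
      · rename_i c2 heq2
        rw [h2] at heq2
        obtain rfl : c2 = c' := (Option.some.inj heq2).symm
        subst hc'
        rw [ih hinv']
        exact gSpec_step c ms' fst token t ht hlen htok
  | case4 c ms hlen hm h =>
    intro _
    have hc : c ≠ [] := by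
      intro hnil; subst hnil; simp at hlen; omega
    rcases List.eq_nil_or_concat' c with rfl | ⟨l, b, rfl⟩
    · exact absurd rfl hc
    · rw [PySem.List.pop?_last] at h
      exact absurd h (by simp)
  | case5 c ms hlen hm fst c' h ih =>
    intro hinv
    obtain rfl : c = c' ++ [fst] := pvPopLast h
    have hms : ms = [] := by
      cases ms with
      | nil => rfl
      | cons m ms => simp at hm
    subst hms
    rw [csgLoop, if_pos hlen, if_neg hm]
    split
    · rename_i heq
      rw [h] at heq
      simp at heq
    · rename_i x c2 heq
      rw [h] at heq
      simp only [Option.some.injEq, Prod.mk.injEq] at heq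
      obtain ⟨rfl, rfl⟩ := heq
      rw [ih (by intro w; simp)]
      simp only [gSpec, List.map_nil, List.length_nil, Nat.min_zero, List.drop_nil, List.foldl_nil]
      have hτ : t.toNat ≤ c'.length := by
        simp [List.length_append] at hlen
        omega
      rw [List.take_append_of_le_length hτ]
  | case6 c ms hlen =>
    intro hinv
    rw [csgLoop, if_neg hlen]
    have hτ : c.length ≤ t.toNat := by omega
    simp only [gSpec]
    have hk : c.length - t.toNat = 0 := by omega
    rw [hk]
    have hd : (ms.map Prod.snd).drop ms.length = [] := by simp
    simp [hd, List.take_of_length_le hτ]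

-- filtered enumerate yields the filtered list
theorem map_snd_filter_enumerate (l : List String) (p : String → Bool) (s : Int) :
    ((PySem.List.enumerate l s).filter (fun q => p q.2)).map Prod.snd = l.filter p := by
  induction l generalizing s with
  | nil => rfl
  | cons x xs ih =>
    rw [PySem.List.enumerate_cons]
    by_cases hp : p x <;> simp [List.filter_cons, hp, ih]

-- B's counting pass is the structural "skip the first cnt w occurrences of w"
def dropCnt (cnt : String → Nat) : List String → List String
  | [] => []
  | x :: xs => if cnt x > 0 then dropCnt (fun w => if w = x then cnt w - 1 else cnt w) xs
               else x :: dropCnt cnt xs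

theorem dropCnt_congr {cnt cnt' : String → Nat} (c : List String)
    (h : ∀ w, cnt w = cnt' w) : dropCnt cnt c = dropCnt cnt' c := by
  induction c generalizing cnt cnt' with
  | nil => rfl
  | cons x xs ih =>
    simp only [dropCnt, h x]
    split
    · exact ih (fun w => by simp [h w])
    · rw [ih h]

theorem dropCnt_zero (c : List String) : dropCnt (fun _ => 0) c = c := by
  induction c with
  | nil => rfl
  | cons x xs ih => simpa [dropCnt] using ih

theorem dropCnt_bump (c : List String) (cnt : String → Nat) (v : String) (hv : v ∈ c) :
    dropCnt (fun w => if w = v then cnt w + 1 else cnt w) c = dropCnt cnt (c.erase v) := by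
  induction c generalizing cnt with
  | nil => cases hv
  | cons x xs ih =>
    by_cases hx : x = v
    · subst hx
      rw [List.erase_cons_head]
      show (if (if x = x then cnt x + 1 else cnt x) > 0 then _ else _) = _
      rw [if_pos rfl, if_pos (by omega)]
      exact dropCnt_congr xs (fun w => by by_cases h : w = x <;> simp [h])
    · have hvxs : v ∈ xs := by cases hv with | head => exact absurd rfl hx | tail _ h => exact h
      have herase : (x :: xs).erase v = x :: xs.erase v :=
        List.erase_cons_tail (by simp [hx])
      rw [herase]
      show (if (if x = v then cnt x + 1 else cnt x) > 0 then _ else _) = _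
      rw [if_neg hx]
      by_cases hc : cnt x > 0
      · rw [if_pos hc]
        show _ = (if cnt x > 0 then _ else _)
        rw [if_pos hc]
        rw [dropCnt_congr xs (cnt' := fun w => if w = v then (if w = x then cnt w - 1 else cnt w) + 1 else (if w = x then cnt w - 1 else cnt w))
            (fun w => by
              by_cases h2 : w = x
              · subst h2; simp [hx, Ne.symm hx]
              · by_cases h1 : w = v
                · subst h1; simp [h2, Ne.symm hx]
                · simp [h1, h2])]
        exact ih _ hvxs
      · rw [if_neg hc]
        show _ = (if cnt x > 0 then _ else _)
        rw [if_neg hc, ih _ hvxs]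

theorem dropCnt_count_eq (S : List String) (c : List String)
    (h : ∀ w, S.count w ≤ c.count w) :
    dropCnt (fun w => S.count w) c = List.foldl List.erase c S := by
  induction S generalizing c with
  | nil => simpa using dropCnt_zero c
  | cons v S ih =>
    have hv : v ∈ c := by
      have := h v
      simp only [List.count_cons_self] at this
      exact List.count_pos_iff.mp (by omega)
    have hS : ∀ w, S.count w ≤ (c.erase v).count w := by
      intro w
      have := h w
      rw [List.count_erase]
      by_cases hw : w = v
      · subst hw; simp at this ⊢; omega
      · simp only [List.count_cons, beq_iff_eq, if_neg hw, if_neg (Ne.symm hw)] at this ⊢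
        omega
    have hc : dropCnt (fun w => (v :: S).count w) c
        = dropCnt (fun w => if w = v then S.count w + 1 else S.count w) c := by
      apply dropCnt_congr
      intro w
      by_cases hw : w = v
      · simp [List.count_cons, hw]
      · simp [List.count_cons, hw, Ne.symm hw]
    rw [List.foldl_cons, hc, dropCnt_bump c _ v hv, ih _ hS]

-- B's fold pass, with any nonnegative dictionary, is dropCnt of its getD counts
theorem pass_eq (c : List String) (dd : PySem.Dict String Int) (acc : List String)
    (hnn : ∀ w, 0 ≤ dd.getD w 0) :
    (c.foldl (fun (st : PySem.Dict String Int × List String) w =>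
        if st.1.getD w 0 > 0 then (st.1.insert w (st.1.getD w 0 - 1), st.2)
        else (st.1, st.2 ++ [w])) (dd, acc)).2
      = acc ++ dropCnt (fun w => (dd.getD w 0).toNat) c := by
  induction c generalizing dd acc with
  | nil => simp [dropCnt]
  | cons x xs ih =>
    simp only [List.foldl_cons]
    by_cases hx : dd.getD x 0 > 0
    · rw [if_pos hx]
      simp only [dropCnt, Int.lt_iff_add_one_le] at *
      rw [ih _ _ (fun w => by rw [PySem.Dict.getD_insert]; split <;> [omega; exact hnn w])]
      have : dropCnt (fun w => (((dd.insert x (dd.getD x 0 - 1)).getD w 0)).toNat) xs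
          = dropCnt (fun w => if w = x then (dd.getD w 0).toNat - 1 else (dd.getD w 0).toNat) xs := by
        apply dropCnt_congr
        intro w
        rw [PySem.Dict.getD_insert]
        split <;> simp_all <;> omega
      rw [this, if_pos (by omega)]
    · rw [if_neg hx]
      have hx0 : (dd.getD x 0).toNat = 0 := by have := hnn x; omega
      simp only [dropCnt, hx0]
      rw [ih _ _ hnn]
      simp

-- ===== VERDICT helper: the two sides meet at gSpec =====
theorem a_eq_gSpec (sg : List String) (t : Int) (nw : List String) (ht : 0 ≤ t) :
    compress_safe_group sg t nw = gSpec sg ((PySem.List.enumerate sg 0).filter (fun p => nw.contains p.2)) t := by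
  apply csgLoop_eq _ _ _ ht
  intro w
  apply List.Sublist.count_le
  rw [map_snd_filter_enumerate]
  exact List.filter_sublist

theorem b_eq_gSpec (sg : List String) (t : Int) (nw : List String) (ht : 0 ≤ t) :
    compress_safe_group_alt sg t nw = gSpec sg ((PySem.List.enumerate sg 0).filter (fun p => nw.contains p.2)) t := by
  have hmapsnd : (((PySem.List.enumerate sg 0).filter (fun p => nw.contains p.2)).map Prod.snd)
      = sg.filter (fun w => nw.contains w) := map_snd_filter_enumerate sg _ 0
  have hcont : ∀ w, (PySem.Set.ofList nw).contains w = nw.contains w := fun w => by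
    simp [PySem.Set.contains]
  simp only [compress_safe_group_alt, gSpec, hmapsnd, hcont]
  set T := sg.filter (fun w => nw.contains w) with hT
  have hTsub : T.Sublist sg := List.filter_sublist
  have hTlen : T.length ≤ sg.length := hTsub.length_le
  by_cases hd : (sg.length : Int) - t ≤ 0
  · rw [if_pos hd]
    have hτ : sg.length ≤ t.toNat := by omega
    have hk0 : sg.length - t.toNat = 0 := by omega
    have hdrop : T.drop (T.length - min (sg.length - t.toNat) T.length) = [] := by
      rw [hk0]
      simp
    rw [hdrop, List.foldl_nil, List.take_of_length_le hτ]
  · rw [if_neg hd]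
    have hkNat : (min ((sg.length : Int) - t) (T.length : Int)).toNat
        = min (sg.length - t.toNat) T.length := by omega
    have hcount_suffix : ∀ w,
        (T.drop (T.length - min (sg.length - t.toNat) T.length)).count w ≤ sg.count w :=
      fun w => ((List.drop_sublist _ _).trans hTsub).count_le w
    have hgetD : ∀ w,
        ((T.drop (T.length - (min ((sg.length : Int) - t) (T.length : Int)).toNat)).foldl
          (fun dd w => dd.insert w (dd.getD w 0 + 1)) PySem.Dict.empty).getD w 0
        = ((T.drop (T.length - min (sg.length - t.toNat) T.length)).count w : Int) := by
      intro w
      rw [hkNat, PySem.Dict.getD_foldl_insert_add_one]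
      simp
    rw [pass_eq sg _ [] (fun w => by rw [hgetD]; exact Int.natCast_nonneg _)]
    rw [dropCnt_congr sg (cnt' := fun w => (T.drop (T.length - min (sg.length - t.toNat) T.length)).count w)
        (fun w => by rw [hgetD]; simp)]
    rw [dropCnt_count_eq _ _ hcount_suffix, List.nil_append]
    by_cases hbig : (sg.length : Int) - t > min ((sg.length : Int) - t) (T.length : Int)
    · rw [if_pos hbig, PySem.List.slice_to _ (le_max_right t 0)]
      have hmax : (max t 0).toNat = t.toNat := by omega
      rw [hmax]
    · rw [if_neg hbig]
      have hkeq : min (sg.length - t.toNat) T.length = sg.length - t.toNat := by omega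
      have hlenout : (List.foldl List.erase sg
          (T.drop (T.length - min (sg.length - t.toNat) T.length))).length ≤ t.toNat := by
        rw [length_foldl_erase _ _ hcount_suffix, List.length_drop]
        omega
      rw [List.take_of_length_le hlenout]

-- ===== VERDICT (by name: the statement is the Claim_ definition above) =====
theorem compress_safe_group_spec : Claim_equal_compress_safe_group := by
  intro sg t nw _ hpre
  unfold Spec_compress_safe_group
  rw [a_eq_gSpec sg t nw hpre, b_eq_gSpec sg t nw hpre]
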